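-- pv_equiv track=rewrite | github.com/smitkothariusa/GroceryGenius | backend/app/routers/barcode.py | _map_off_category
-- ===== SOURCE A (Python) =====
-- def _map_off_category(categories_tags: list) -> str:
--     cats = [c.lower() for c in categories_tags]
--     if any("meat" in c or "poultry" in c or "beef" in c or "chicken" in c for c in cats):
--         return "meat"
--     if any("dairy" in c or "milk" in c or "cheese" in c or "yogurt" in c for c in cats):
--         return "dairy"
--     if any("fruit" in c or "vegetable" in c or "produce" in c for c in cats):
--         return "produce"
--     if any("beverage" in c or "drink" in c or "juice" in c or "water" in c for c in cats):
--         return "beverages"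
--     if any("snack" in c or "chip" in c or "cookie" in c or "cracker" in c for c in cats):
--         return "snacks"
--     if any("frozen" in c for c in cats):
--         return "frozen"
--     if any("breakfast" in c or "cereal" in c for c in cats):
--         return "breakfast"
--     if any("bakery" in c or "baked" in c or "bread" in c for c in cats):
--         return "bakery"
--     if any("condiment" in c or "sauce" in c or "dressing" in c for c in cats):
--         return "condiments"
--     if any("grain" in c or "pasta" in c or "rice" in c for c in cats):
--         return "grains"
--     if any("can" in c or "preserved" in c for c in cats):
--         return "canned"
--     return "other"
-- ===== SOURCE B (Python) =====
-- _GROUPS = [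
--     ("meat", ("meat", "poultry", "beef", "chicken")),
--     ("dairy", ("dairy", "milk", "cheese", "yogurt")),
--     ("produce", ("fruit", "vegetable", "produce")),
--     ("beverages", ("beverage", "drink", "juice", "water")),
--     ("snacks", ("snack", "chip", "cookie", "cracker")),
--     ("frozen", ("frozen",)),
--     ("breakfast", ("breakfast", "cereal")),
--     ("bakery", ("bakery", "baked", "bread")),
--     ("condiments", ("condiment", "sauce", "dressing")),
--     ("grains", ("grain", "pasta", "rice")),
--     ("canned", ("can", "preserved")),
-- ]
--
--
-- def _map_off_category(categories_tags: list) -> str: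
--     best = len(_GROUPS)
--     for c in categories_tags:
--         lc = c.lower()
--         for i, (_cat, kws) in enumerate(_GROUPS):
--             if i < best and any(k in lc for k in kws):
--                 best = i
--     return _GROUPS[best][0] if best < len(_GROUPS) else "other"
-- ===== Notes on version B (the rewrite author's own statement) =====
-- stated objective: alternative
-- what changed: A's eleven separate short-circuiting any-scans over the tag list are replaced by one pass over the tags against an ordered keyword->category table, keeping the minimum matching priority index and looking the category up once at the end.
import Mathlib
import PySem

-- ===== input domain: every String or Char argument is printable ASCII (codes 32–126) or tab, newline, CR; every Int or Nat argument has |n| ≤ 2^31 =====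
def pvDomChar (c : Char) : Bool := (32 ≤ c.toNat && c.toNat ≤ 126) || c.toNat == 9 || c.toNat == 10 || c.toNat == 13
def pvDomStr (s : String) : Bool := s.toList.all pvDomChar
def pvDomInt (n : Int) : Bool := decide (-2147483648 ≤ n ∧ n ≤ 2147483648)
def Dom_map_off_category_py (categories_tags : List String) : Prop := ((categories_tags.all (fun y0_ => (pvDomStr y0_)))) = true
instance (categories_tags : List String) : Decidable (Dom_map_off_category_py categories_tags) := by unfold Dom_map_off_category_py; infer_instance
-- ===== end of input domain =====

-- B replaces A's eleven short-circuiting scans over the tag list by one pass that keeps the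
-- minimum-priority matching group of an ordered keyword table (objective: alternative).

-- ===== PORT A =====
def map_off_category_py (categories_tags : List String) : String :=
  let cats := categories_tags.map (fun c => PySem.Str.lower c)
  if cats.any (fun c => PySem.Str.isIn "meat" c || (PySem.Str.isIn "poultry" c || (PySem.Str.isIn "beef" c || PySem.Str.isIn "chicken" c))) then "meat"
  else if cats.any (fun c => PySem.Str.isIn "dairy" c || (PySem.Str.isIn "milk" c || (PySem.Str.isIn "cheese" c || PySem.Str.isIn "yogurt" c))) then "dairy"
  else if cats.any (fun c => PySem.Str.isIn "fruit" c || (PySem.Str.isIn "vegetable" c || PySem.Str.isIn "produce" c)) then "produce"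
  else if cats.any (fun c => PySem.Str.isIn "beverage" c || (PySem.Str.isIn "drink" c || (PySem.Str.isIn "juice" c || PySem.Str.isIn "water" c))) then "beverages"
  else if cats.any (fun c => PySem.Str.isIn "snack" c || (PySem.Str.isIn "chip" c || (PySem.Str.isIn "cookie" c || PySem.Str.isIn "cracker" c))) then "snacks"
  else if cats.any (fun c => PySem.Str.isIn "frozen" c) then "frozen"
  else if cats.any (fun c => PySem.Str.isIn "breakfast" c || PySem.Str.isIn "cereal" c) then "breakfast"
  else if cats.any (fun c => PySem.Str.isIn "bakery" c || (PySem.Str.isIn "baked" c || PySem.Str.isIn "bread" c)) then "bakery"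
  else if cats.any (fun c => PySem.Str.isIn "condiment" c || (PySem.Str.isIn "sauce" c || PySem.Str.isIn "dressing" c)) then "condiments"
  else if cats.any (fun c => PySem.Str.isIn "grain" c || (PySem.Str.isIn "pasta" c || PySem.Str.isIn "rice" c)) then "grains"
  else if cats.any (fun c => PySem.Str.isIn "can" c || PySem.Str.isIn "preserved" c) then "canned"
  else "other"

-- ===== PORT B =====
def pvGroups : List (String × List String) :=
  [("meat", ["meat", "poultry", "beef", "chicken"]),
   ("dairy", ["dairy", "milk", "cheese", "yogurt"]),
   ("produce", ["fruit", "vegetable", "produce"]),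
   ("beverages", ["beverage", "drink", "juice", "water"]),
   ("snacks", ["snack", "chip", "cookie", "cracker"]),
   ("frozen", ["frozen"]),
   ("breakfast", ["breakfast", "cereal"]),
   ("bakery", ["bakery", "baked", "bread"]),
   ("condiments", ["condiment", "sauce", "dressing"]),
   ("grains", ["grain", "pasta", "rice"]),
   ("canned", ["can", "preserved"])]

def map_off_category_py_alt (categories_tags : List String) : String :=
  let best : Int := categories_tags.foldl (fun best c =>
    (PySem.List.enumerate pvGroups 0).foldl (fun b p =>
      if decide (p.1 < b) && p.2.2.any (fun k => PySem.Str.isIn k (PySem.Str.lower c)) then p.1 else b) best)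
    ((pvGroups.length : Nat) : Int)
  if best < (pvGroups.length : Int) then (PySem.List.pyGetD pvGroups best ("", [])).1 else "other"

-- ===== PRECONDITION & SPEC =====
def Spec_map_off_category_py (categories_tags : List String) (out : String) : Prop := out = map_off_category_py_alt categories_tags
instance (categories_tags : List String) (out : String) : Decidable (Spec_map_off_category_py categories_tags out) := by unfold Spec_map_off_category_py; infer_instance

-- ===== CLAIM (what is proved, stated in full; the proofs are below) =====
def Claim_equal_map_off_category_py : Prop := ∀ (categories_tags : List String), Dom_map_off_category_py categories_tags → Spec_map_off_category_py categories_tags (map_off_category_py categories_tags)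

-- ===== LEMMAS AND PROOFS =====

-- does group g match the (already lowercased) tag lc?
def pvT (g : String × List String) (lc : String) : Bool := g.2.any (fun k => PySem.Str.isIn k lc)

-- index of the first group of L matching lc (L.length if none)
def pvSIdx (L : List (String × List String)) (lc : String) : Nat :=
  match L with
  | [] => 0
  | g :: L => if pvT g lc then 0 else pvSIdx L lc + 1

-- A's chain of scans, written as recursion over the group table
def pvChain (L : List (String × List String)) (cats : List String) : String :=
  match L with
  | [] => "other"
  | g :: L => if cats.any (fun c => pvT g (PySem.Str.lower c)) then g.1 else pvChain L cats

-- B's loop, in Nat form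
def pvBest (L : List (String × List String)) (cats : List String) : Nat :=
  cats.foldl (fun a c => min a (pvSIdx L (PySem.Str.lower c))) L.length

def pvCore (L : List (String × List String)) (cats : List String) : String :=
  if pvBest L cats < L.length then (L.getD (pvBest L cats) ("", [])).1 else "other"

theorem pvSIdx_le (L : List (String × List String)) (lc : String) : pvSIdx L lc ≤ L.length := by
  induction L with
  | nil => simp [pvSIdx]
  | cons g L ih => simp only [pvSIdx, List.length_cons]; split <;> omega

-- the inner enumerate-loop computes min acc (s + first matching index)
theorem pvInner_eq (lc : String) (L : List (String × List String)) :
    ∀ (s acc : Int), acc ≤ s + L.length →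
    (PySem.List.enumerate L s).foldl (fun b p =>
      if decide (p.1 < b) && p.2.2.any (fun k => PySem.Str.isIn k lc) then p.1 else b) acc
      = min acc (s + pvSIdx L lc) := by
  induction L with
  | nil =>
    intro s acc h
    simp only [List.length_nil, Nat.cast_zero, add_zero] at h
    simp [PySem.List.enumerate_nil, pvSIdx]
    omega

  | cons g L ih =>
    intro s acc h
    simp only [List.length_cons] at h
    rw [PySem.List.enumerate_cons]
    simp only [List.foldl_cons]
    have hs := pvSIdx_le L lc
    by_cases ht : g.2.any (fun k => PySem.Str.isIn k lc)
    · by_cases hlt : s < acc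
      · simp only [ht, hlt, decide_true, Bool.and_true, if_true]
        rw [ih (s + 1) s (by omega)]
        simp only [pvSIdx, pvT, ht, if_true]
        push_cast; omega
      · simp only [ht, hlt, decide_false, Bool.and_true, Bool.false_eq_true, if_false]
        rw [ih (s + 1) acc (by push_cast at h ⊢; omega)]
        simp only [pvSIdx, pvT, ht, if_true]
        push_cast; omega
    · simp only [ht, Bool.and_false, Bool.false_eq_true, if_false]
      rw [ih (s + 1) acc (by push_cast at h ⊢; omega)]
      simp only [pvSIdx, pvT, ht]
      push_cast; omega

-- characterization of the outer fold
theorem pvFold_le_iff (f : String → Nat) (cats : List String) :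
    ∀ (acc i : Nat), (cats.foldl (fun a c => min a (f c)) acc ≤ i ↔ acc ≤ i ∨ ∃ c ∈ cats, f c ≤ i) := by
  induction cats with
  | nil => intro acc i; simp
  | cons c cats ih =>
    intro acc i
    simp only [List.foldl_cons, ih, List.mem_cons]
    constructor
    · rintro (h | ⟨d, hd, hfd⟩)
      · by_cases hc : f c ≤ i
        · exact Or.inr ⟨c, Or.inl rfl, hc⟩
        · exact Or.inl (by omega)
      · exact Or.inr ⟨d, Or.inr hd, hfd⟩
    · rintro (h | ⟨d, rfl | hd, hfd⟩)
      · exact Or.inl (by omega)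
      · exact Or.inl (by omega)
      · exact Or.inr ⟨d, hd, hfd⟩

theorem pvFold_le_acc (f : String → Nat) (cats : List String) (acc : Nat) :
    cats.foldl (fun a c => min a (f c)) acc ≤ acc :=
  (pvFold_le_iff f cats acc acc).mpr (Or.inl le_rfl)

-- when every f is g + 1 on cats, the running min shifts by one
theorem pvFold_succ (f g : String → Nat) (cats : List String)
    (h : ∀ c ∈ cats, f c = g c + 1) :
    ∀ acc : Nat, cats.foldl (fun a c => min a (f c)) (acc + 1) =
      cats.foldl (fun a c => min a (g c)) acc + 1 := by
  induction cats with
  | nil => intro acc; simp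
  | cons c cats ih =>
    intro acc
    simp only [List.foldl_cons]
    rw [h c (by simp), show min (acc + 1) (g c + 1) = min acc (g c) + 1 by omega]
    exact ih (fun d hd => h d (by simp [hd])) _

-- A's chain equals B's minimum-index formulation, for every table
theorem pvChain_eq_core (L : List (String × List String)) (cats : List String) :
    pvChain L cats = pvCore L cats := by
  induction L with
  | nil =>
    have h0 : pvBest [] cats = 0 := Nat.le_zero.mp (by
      simpa [pvBest] using pvFold_le_acc (fun c => pvSIdx [] (PySem.Str.lower c)) cats 0)
    simp [pvChain, pvCore, h0]
  | cons g L ih =>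
    by_cases h : cats.any (fun c => pvT g (PySem.Str.lower c))
    · obtain ⟨c, hc, htc⟩ := List.any_eq_true.mp h
      have hb : pvBest (g :: L) cats = 0 := Nat.le_zero.mp <| by
        refine (pvFold_le_iff _ cats _ 0).mpr (Or.inr ⟨c, hc, ?_⟩)
        simp [pvSIdx, htc]
      simp [pvChain, h, pvCore, hb]
    · have hall : ∀ c ∈ cats, pvSIdx (g :: L) (PySem.Str.lower c) = pvSIdx L (PySem.Str.lower c) + 1 := by
        intro c hc
        have : pvT g (PySem.Str.lower c) = false := by
          by_contra hcon
          exact h (List.any_eq_true.mpr ⟨c, hc, by simpa using hcon⟩)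
        simp [pvSIdx, this]
      have hb : pvBest (g :: L) cats = pvBest L cats + 1 := by
        simpa [pvBest] using pvFold_succ _ (fun c => pvSIdx L (PySem.Str.lower c)) cats hall L.length
      simp only [pvChain, h, Bool.false_eq_true, if_false, ih, pvCore, hb, List.length_cons,
        Nat.add_lt_add_iff_right]
      split <;> simp [List.getD]

-- A's port is pvChain on the literal table
theorem pvA_eq_chain (cats : List String) :
    map_off_category_py cats = pvChain pvGroups cats := by
  simp only [map_off_category_py, pvChain, pvGroups, pvT, List.any_cons, List.any_nil,
    Bool.or_false, List.any_map, Function.comp_def]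

-- B's port is pvCore on the literal table
theorem pvB_eq_core (cats : List String) :
    map_off_category_py_alt cats = pvCore pvGroups cats := by
  have hfold : ∀ (a : Nat), a ≤ pvGroups.length →
      cats.foldl (fun best c =>
        (PySem.List.enumerate pvGroups 0).foldl (fun b p =>
          if decide (p.1 < b) && p.2.2.any (fun k => PySem.Str.isIn k (PySem.Str.lower c)) then p.1 else b) best) ((a : Nat) : Int)
      = ((cats.foldl (fun a c => min a (pvSIdx pvGroups (PySem.Str.lower c))) a : Nat) : Int) := by
    induction cats with
    | nil => intro a _; simp
    | cons c cats ih =>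
      intro a ha
      simp only [List.foldl_cons]
      rw [pvInner_eq (PySem.Str.lower c) pvGroups 0 (a : Int) (by omega)]
      rw [show min ((a : Nat) : Int) ((0 : Int) + pvSIdx pvGroups (PySem.Str.lower c))
        = ((min a (pvSIdx pvGroups (PySem.Str.lower c)) : Nat) : Int) by push_cast; omega]
      exact ih _ (le_trans (Nat.min_le_left _ _) ha)
  unfold map_off_category_py_alt pvCore pvBest
  rw [hfold pvGroups.length le_rfl]
  simp only [PySem.List.pyGetD_natCast, Nat.cast_lt]

-- ===== VERDICT (by name: the statement is the Claim_ definition above) =====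
theorem map_off_category_py_spec : Claim_equal_map_off_category_py := by
  intro cats _
  unfold Spec_map_off_category_py
  rw [pvA_eq_chain, pvB_eq_core, pvChain_eq_core]
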